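-- pv_equiv track=rewrite | github.com/MrBrantCode/unitest_baseline | mut_generate/mist_train_taco/taco_1449/solution.py | min_operations_to_delete_string
-- ===== SOURCE A (Python) =====
-- def min_operations_to_delete_string(s: str, n: int = None) -> int:
--     if n is None:
--         n = len(s)
--
--     # Preprocess the string to remove consecutive duplicates
--     ss = ''
--     re = ''
--     for i in range(n):
--         if re != s[i]:
--             ss += re
--             re = s[i]
--     ss += re
--
--     a = ss
--     N = len(a)
--
--     # Initialize the dp array
--     dp = [[0 for _ in range(N + 1)] for _ in range(N + 1)]
--
--     # Fill the dp array
--     for l in range(1, N + 1):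
--         i = 0
--         j = l - 1
--         while j < N:
--             if l == 1:
--                 dp[i][j] = 1
--             else:
--                 dp[i][j] = 1 + dp[i + 1][j]
--                 for K in range(i + 1, j + 1):
--                     if a[i] == a[K]:
--                         if dp[i][j] >= dp[i][K - 1] + dp[K + 1][j]:
--                             dp[i][j] = dp[i][K - 1] + dp[K + 1][j]
--             i += 1
--             j += 1
--
--     return dp[0][N - 1]
-- ===== SOURCE B (Python) =====
-- def min_operations_to_delete_string(s: str, n: int = None) -> int:
--     if n is None:
--         n = len(s)
--
--     # Preprocess the string to remove consecutive duplicates (as in the original)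
--     ss = ''
--     re = ''
--     for i in range(n):
--         if re != s[i]:
--             ss += re
--             re = s[i]
--     ss += re
--
--     a = ss
--     N = len(a)
--
--     memo = {}
--
--     def solve(i, j):
--         if i > j:
--             return 0
--         if i == j:
--             return 1
--         key = (i, j)
--         if key in memo:
--             return memo[key]
--         best = 1 + solve(i + 1, j)
--         for K in range(i + 1, j + 1):
--             if a[i] == a[K]:
--                 cand = solve(i, K - 1) + solve(K + 1, j)
--                 if cand < best:
--                     best = cand
--         memo[key] = best
--         return best
--
--     return solve(0, N - 1) if N else 0
-- ===== Notes on version B (the rewrite author's own statement) =====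
-- stated objective: alternative
-- what changed: The bottom-up (N+1)x(N+1) dp-table fill over interval lengths is replaceded by a memoized top-down recursion solve(i,j) over intervals of the collapsed string, allocating no table and only visiting intervals the recursion reaches.
import Mathlib
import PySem

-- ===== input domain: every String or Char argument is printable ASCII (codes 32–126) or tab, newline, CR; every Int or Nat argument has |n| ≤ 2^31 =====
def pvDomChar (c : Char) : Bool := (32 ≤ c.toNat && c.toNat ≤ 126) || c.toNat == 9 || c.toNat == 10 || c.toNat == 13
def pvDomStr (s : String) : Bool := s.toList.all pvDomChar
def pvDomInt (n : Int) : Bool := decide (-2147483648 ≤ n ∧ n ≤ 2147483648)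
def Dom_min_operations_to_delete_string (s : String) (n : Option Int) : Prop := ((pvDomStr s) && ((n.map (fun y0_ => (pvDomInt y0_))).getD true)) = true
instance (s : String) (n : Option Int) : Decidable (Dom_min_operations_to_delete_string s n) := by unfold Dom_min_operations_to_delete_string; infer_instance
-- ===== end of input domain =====

-- B replaces A's bottom-up (N+1)×(N+1) dp-table fill by a memoized top-down recursion
-- solve(i,j) over intervals of the collapsed string (objective: alternative decomposition).

-- ===== PORT A =====
-- shared preprocessing (both Pythons run the identical collapse loop):
-- ss/re accumulation over range(n); none = IndexError (n > len(s), excluded by Pre_)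
def pvCollapse (s : List Char) (n : Int) : Option (List Char) :=
  ((PySem.List.pyRange 0 n 1).foldl
    (fun st i =>
      match st with
      | none => none
      | some (ss, re) =>
        match PySem.List.pyGet? s i with
        | none => none
        | some c => if re ≠ [c] then some (ss ++ re, [c]) else some (ss, re))
    (some ([], []))).map (fun p => p.1 ++ p.2)

-- dp[i][j] read / write on the 2-dimensional list
def pvGet2 (dp : List (List Int)) (i j : Nat) : Int := (dp.getD i []).getD j 0
def pvSet2 (dp : List (List Int)) (i j : Nat) (v : Int) : List (List Int) :=
  dp.set i ((dp.getD i []).set j v)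

-- inner `for K in range(i+1, j+1)` loop computing dp[i][j] (the l ≠ 1 branch)
def pvCellA (a : List Char) (dp : List (List Int)) (i j : Nat) : Int :=
  (List.range (j - i)).foldl
    (fun v k =>
      if a.getD i ' ' = a.getD (i + 1 + k) ' ' ∧
          pvGet2 dp i (i + 1 + k - 1) + pvGet2 dp (i + 1 + k + 1) j ≤ v
      then pvGet2 dp i (i + 1 + k - 1) + pvGet2 dp (i + 1 + k + 1) j
      else v)
    (1 + pvGet2 dp (i + 1) j)

-- the `while j < N` diagonal loop for one length l (i = t, j = t + l - 1)
def pvFillLen (a : List Char) (N l : Nat) (dp : List (List Int)) : List (List Int) :=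
  (List.range (N + 1 - l)).foldl
    (fun d t =>
      if l = 1 then pvSet2 d t (t + l - 1) 1
      else pvSet2 d t (t + l - 1) (pvCellA a d t (t + l - 1)))
    dp

def min_operations_to_delete_string (s : String) (n : Option Int) : Int :=
  let nn : Int := match n with | none => (s.toList.length : Int) | some k => k
  match pvCollapse s.toList nn with
  | none => 0  -- unreachable under Pre_: the Python raises IndexError here
  | some a =>
    let N := a.length
    let dp0 : List (List Int) := List.replicate (N + 1) (List.replicate (N + 1) 0)
    let dp := (List.range N).foldl (fun d r => pvFillLen a N (r + 1) d) dp0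
    (PySem.List.pyGet? (dp.getD 0 []) ((N : Int) - 1)).getD 0

-- ===== PORT B =====
-- memoized recursion solve(i, j), the memo dict threaded through explicitly
def pvSolveB (a : List Char) (i j : Nat) (m : PySem.Dict (Nat × Nat) Int) :
    Int × PySem.Dict (Nat × Nat) Int :=
  if j < i then (0, m)
  else if i = j then (1, m)
  else
    match m.get? (i, j) with
    | some v => (v, m)
    | none =>
      let p0 := pvSolveB a (i + 1) j m
      let q := (List.range (j - i)).attach.foldl
        (fun (acc : Int × PySem.Dict (Nat × Nat) Int) kk =>
          if a.getD i ' ' = a.getD (i + 1 + kk.1) ' ' then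
            let p1 := pvSolveB a i (i + 1 + kk.1 - 1) acc.2
            let p2 := pvSolveB a (i + 1 + kk.1 + 1) j p1.2
            (if p1.1 + p2.1 < acc.1 then p1.1 + p2.1 else acc.1, p2.2)
          else acc)
        (1 + p0.1, p0.2)
      (q.1, q.2.insert (i, j) q.1)
termination_by j + 1 - i
decreasing_by
  all_goals first
    | omega
    | (have := List.mem_range.mp kk.2; omega)

def min_operations_to_delete_string_alt (s : String) (n : Option Int) : Int :=
  let nn : Int := match n with | none => (s.toList.length : Int) | some k => k
  match pvCollapse s.toList nn with
  | none => 0  -- unreachable under Pre_: B's Python raises IndexError here too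
  | some a =>
    let N := a.length
    if N = 0 then 0 else (pvSolveB a 0 (N - 1) PySem.Dict.empty).1

-- ===== PRECONDITION & SPEC =====
-- Pre_ excludes exactly the inputs where both Pythons raise IndexError: n given and n > len(s).
def Pre_min_operations_to_delete_string (s : String) (n : Option Int) : Prop :=
  (n.getD (s.toList.length : Int)) ≤ (s.toList.length : Int)
instance (s : String) (n : Option Int) : Decidable (Pre_min_operations_to_delete_string s n) := by
  unfold Pre_min_operations_to_delete_string; infer_instance
def pvWitness_min_operations_to_delete_string : String × Option Int := ("abacc", none)

def Spec_min_operations_to_delete_string (s : String) (n : Option Int) (out : Int) : Prop := out = min_operations_to_delete_string_alt s n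
instance (s : String) (n : Option Int) (out : Int) : Decidable (Spec_min_operations_to_delete_string s n out) := by unfold Spec_min_operations_to_delete_string; infer_instance

-- ===== CLAIM (what is proved, stated in full; the proofs are below) =====
def Claim_equal_min_operations_to_delete_string : Prop := ∀ (s : String) (n : Option Int), Dom_min_operations_to_delete_string s n → Pre_min_operations_to_delete_string s n → Spec_min_operations_to_delete_string s n (min_operations_to_delete_string s n)

-- ===== LEMMAS AND PROOFS =====

-- pure interval recurrence: the common mathematical core of both programs
def pvS (a : List Char) (i j : Nat) : Int :=
  if j < i then 0
  else if i = j then 1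
  else
    (List.range (j - i)).attach.foldl
      (fun acc kk =>
        if a.getD i ' ' = a.getD (i + 1 + kk.1) ' ' then
          (if pvS a i (i + 1 + kk.1 - 1) + pvS a (i + 1 + kk.1 + 1) j < acc
           then pvS a i (i + 1 + kk.1 - 1) + pvS a (i + 1 + kk.1 + 1) j
           else acc)
        else acc)
      (1 + pvS a (i + 1) j)
termination_by j + 1 - i
decreasing_by
  all_goals first
    | omega
    | (have := List.mem_range.mp kk.2; omega)

def MemOK (a : List Char) (m : PySem.Dict (Nat × Nat) Int) : Prop :=
  ∀ i j v, m.get? (i, j) = some v → v = pvS a i j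

theorem pvS_of_lt (a : List Char) (i j : Nat) (h : j < i) : pvS a i j = 0 := by
  rw [pvS]; simp [h]

theorem solveB_spec (a : List Char) : ∀ (d i j : Nat) (m : PySem.Dict (Nat × Nat) Int),
    j + 1 - i ≤ d → MemOK a m →
    (pvSolveB a i j m).1 = pvS a i j ∧ MemOK a (pvSolveB a i j m).2 := by
  intro d
  induction d with
  | zero =>
    intro i j m hd hm
    have hji : j < i := by omega
    rw [pvSolveB, pvS]
    simp only [if_pos hji]
    exact ⟨by trivial, hm⟩
  | succ d ih =>
    intro i j m hd hm
    by_cases hji : j < i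
    · rw [pvSolveB, pvS]
      simp only [if_pos hji]
      exact ⟨by trivial, hm⟩
    · by_cases hij : i = j
      · rw [pvSolveB, pvS]
        simp only [if_neg hji, if_pos hij]
        exact ⟨by trivial, hm⟩
      · rw [pvSolveB]
        simp only [if_neg hji, if_neg hij]
        cases hmem : m.get? (i, j) with
        | some v =>
          exact ⟨hm i j v hmem, hm⟩
        | none =>
          have h0 := ih (i + 1) j m (by omega) hm
          have hfold : ∀ (L : List {x // x ∈ List.range (j - i)})
              (b : Int) (m' : PySem.Dict (Nat × Nat) Int), MemOK a m' →
              (L.foldl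
                (fun (acc : Int × PySem.Dict (Nat × Nat) Int) kk =>
                  if a.getD i ' ' = a.getD (i + 1 + kk.1) ' ' then
                    (if (pvSolveB a i (i + 1 + kk.1 - 1) acc.2).1 +
                          (pvSolveB a (i + 1 + kk.1 + 1) j
                            (pvSolveB a i (i + 1 + kk.1 - 1) acc.2).2).1 < acc.1
                     then (pvSolveB a i (i + 1 + kk.1 - 1) acc.2).1 +
                          (pvSolveB a (i + 1 + kk.1 + 1) j
                            (pvSolveB a i (i + 1 + kk.1 - 1) acc.2).2).1
                     else acc.1,
                     (pvSolveB a (i + 1 + kk.1 + 1) j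
                       (pvSolveB a i (i + 1 + kk.1 - 1) acc.2).2).2)
                  else acc)
                (b, m')).1 =
              L.foldl
                (fun acc kk =>
                  if a.getD i ' ' = a.getD (i + 1 + kk.1) ' ' then
                    (if pvS a i (i + 1 + kk.1 - 1) + pvS a (i + 1 + kk.1 + 1) j < acc
                     then pvS a i (i + 1 + kk.1 - 1) + pvS a (i + 1 + kk.1 + 1) j
                     else acc)
                  else acc)
                b ∧
              MemOK a (L.foldl
                (fun (acc : Int × PySem.Dict (Nat × Nat) Int) kk =>
                  if a.getD i ' ' = a.getD (i + 1 + kk.1) ' ' then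
                    (if (pvSolveB a i (i + 1 + kk.1 - 1) acc.2).1 +
                          (pvSolveB a (i + 1 + kk.1 + 1) j
                            (pvSolveB a i (i + 1 + kk.1 - 1) acc.2).2).1 < acc.1
                     then (pvSolveB a i (i + 1 + kk.1 - 1) acc.2).1 +
                          (pvSolveB a (i + 1 + kk.1 + 1) j
                            (pvSolveB a i (i + 1 + kk.1 - 1) acc.2).2).1
                     else acc.1,
                     (pvSolveB a (i + 1 + kk.1 + 1) j
                       (pvSolveB a i (i + 1 + kk.1 - 1) acc.2).2).2)
                  else acc)
                (b, m')).2 := by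
            intro L
            induction L with
            | nil => intro b m' hm'; exact ⟨rfl, hm'⟩
            | cons kk L ihL =>
              intro b m' hm'
              have hk : kk.1 < j - i := List.mem_range.mp kk.2
              by_cases hc : a.getD i ' ' = a.getD (i + 1 + kk.1) ' '
              · simp only [List.foldl_cons, if_pos hc]
                have h1 := ih i (i + 1 + kk.1 - 1) m' (by omega) hm'
                have h2 := ih (i + 1 + kk.1 + 1) j
                  (pvSolveB a i (i + 1 + kk.1 - 1) m').2 (by omega) h1.2
                rw [h1.1, h2.1]
                exact ihL _ _ h2.2
              · simp only [List.foldl_cons, if_neg hc]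
                exact ihL b m' hm'
          have hpvS : pvS a i j =
              (List.range (j - i)).attach.foldl
                (fun acc kk =>
                  if a.getD i ' ' = a.getD (i + 1 + kk.1) ' ' then
                    (if pvS a i (i + 1 + kk.1 - 1) + pvS a (i + 1 + kk.1 + 1) j < acc
                     then pvS a i (i + 1 + kk.1 - 1) + pvS a (i + 1 + kk.1 + 1) j
                     else acc)
                  else acc)
                (1 + pvS a (i + 1) j) := by
            rw [pvS]; simp only [if_neg hji, if_neg hij]
          obtain ⟨hv, hmo⟩ := hfold (List.range (j - i)).attach
            (1 + (pvSolveB a (i + 1) j m).1) (pvSolveB a (i + 1) j m).2 h0.2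
          refine ⟨?_, ?_⟩
          · rw [hv, h0.1]
            exact hpvS.symm
          · intro i' j' v' hget
            by_cases hkey : ((i', j') : Nat × Nat) = (i, j)
            · rw [hkey, PySem.Dict.get?_insert_self] at hget
              cases hget
              obtain ⟨hi', hj'⟩ := Prod.mk.injEq .. ▸ hkey
              rw [hv, h0.1, hi', hj']
              exact hpvS.symm
            · rw [PySem.Dict.get?_insert_of_ne _ _ hkey] at hget
              exact hmo i' j' v' hget

-- ===== A-side: the dp table equals pvS where filled =====

def pvVal2 (a : List Char) (l T i j : Nat) : Int :=
  if i ≤ j ∧ j < a.length ∧ (j + 1 ≤ i + l ∨ (j = i + l ∧ i < T)) then pvS a i j else 0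

def TableOK2 (a : List Char) (l T : Nat) (dp : List (List Int)) : Prop :=
  dp.length = a.length + 1 ∧ (∀ r ∈ dp, r.length = a.length + 1) ∧
  ∀ i j, i ≤ a.length → j ≤ a.length → pvGet2 dp i j = pvVal2 a l T i j

theorem get2_set2 (dp : List (List Int)) (N : Nat)
    (hlen : dp.length = N + 1) (hrow : ∀ r ∈ dp, r.length = N + 1)
    (i0 j0 : Nat) (hi0 : i0 ≤ N) (hj0 : j0 ≤ N) (v : Int) (i j : Nat) :
    pvGet2 (pvSet2 dp i0 j0 v) i j = if i = i0 ∧ j = j0 then v else pvGet2 dp i j := by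
  have hi0' : i0 < dp.length := by omega
  have hR : dp[i0]?.getD ([] : List Int) = dp[i0] := by
    simp [List.getElem?_eq_getElem hi0']
  have hrlen : dp[i0].length = N + 1 := hrow _ (List.getElem_mem hi0')
  simp only [pvGet2, pvSet2, List.getD_eq_getElem?_getD, List.getElem?_set]
  by_cases hii : i = i0
  · subst hii
    simp only [hi0', if_pos, Option.getD_some, hR]
    rw [List.getElem?_set]
    by_cases hjj : j = j0
    · subst hjj
      have hjlt : j < dp[i].length := by omega
      simp [hjlt]
    · rw [if_neg (by omega : ¬ j0 = j)]
      simp [hjj]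
  · rw [if_neg (fun h => hii h.symm)]
    simp [hii]

theorem pvS_diag (a : List Char) (i : Nat) : pvS a i i = 1 := by
  rw [pvS]; simp

theorem cell_eq (a : List Char) (l T : Nat) (dp : List (List Int))
    (hl : 1 ≤ l) (hTl : T + l < a.length) (h : TableOK2 a l T dp) :
    pvCellA a dp T (T + l) = pvS a T (T + l) := by
  obtain ⟨hlen, hrow, hget⟩ := h
  have h1 : pvS a T (T + l) =
      (List.range (T + l - T)).attach.foldl
        (fun acc kk =>
          (fun (acc : Int) (k : Nat) =>
            if a.getD T ' ' = a.getD (T + 1 + k) ' ' then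
              (if pvS a T (T + 1 + k - 1) + pvS a (T + 1 + k + 1) (T + l) < acc
               then pvS a T (T + 1 + k - 1) + pvS a (T + 1 + k + 1) (T + l)
               else acc)
            else acc) acc kk.1)
        (1 + pvS a (T + 1) (T + l)) := by
    rw [pvS]
    simp only [if_neg (by omega : ¬ (T + l < T)), if_neg (by omega : ¬ (T = T + l))]
  have h2 := List.foldl_attach (l := List.range (T + l - T))
    (f := fun (acc : Int) (k : Nat) =>
      if a.getD T ' ' = a.getD (T + 1 + k) ' ' then
        (if pvS a T (T + 1 + k - 1) + pvS a (T + 1 + k + 1) (T + l) < acc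
         then pvS a T (T + 1 + k - 1) + pvS a (T + 1 + k + 1) (T + l)
         else acc)
      else acc)
    (b := 1 + pvS a (T + 1) (T + l))
  rw [h1, h2]
  unfold pvCellA
  have hinit : pvGet2 dp (T + 1) (T + l) = pvS a (T + 1) (T + l) := by
    rw [hget (T + 1) (T + l) (by omega) (by omega)]
    unfold pvVal2
    rw [if_pos ⟨by omega, by omega, Or.inl (by omega)⟩]
  rw [hinit]
  apply PySem.List.foldl_congr_mem
  intro acc k hkmem
  have hk : k < T + l - T := List.mem_range.mp hkmem
  have hr1 : pvGet2 dp T (T + 1 + k - 1) = pvS a T (T + 1 + k - 1) := by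
    rw [hget T (T + 1 + k - 1) (by omega) (by omega)]
    unfold pvVal2
    rw [if_pos ⟨by omega, by omega, Or.inl (by omega)⟩]
  have hr2 : pvGet2 dp (T + 1 + k + 1) (T + l) = pvS a (T + 1 + k + 1) (T + l) := by
    by_cases hkl : k + 1 < l
    · rw [hget (T + 1 + k + 1) (T + l) (by omega) (by omega)]
      unfold pvVal2
      rw [if_pos ⟨by omega, by omega, Or.inl (by omega)⟩]
    · rw [hget (T + 1 + k + 1) (T + l) (by omega) (by omega)]
      unfold pvVal2
      rw [if_neg (by omega), pvS_of_lt a _ _ (by omega)]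
  rw [hr1, hr2]
  by_cases hc : a.getD T ' ' = a.getD (T + 1 + k) ' '
  · rw [if_congr (and_iff_right hc) rfl rfl, if_pos hc]
    split_ifs <;> omega
  · rw [if_neg (fun h => hc h.1), if_neg hc]

theorem set_preserve (a : List Char) (l T : Nat) (dp : List (List Int))
    (hTl : T + l < a.length) (h : TableOK2 a l T dp)
    (v : Int) (hv : v = pvS a T (T + l)) :
    TableOK2 a l (T + 1) (pvSet2 dp T (T + l) v) := by
  obtain ⟨hlen, hrow, hget⟩ := h
  refine ⟨?_, ?_, ?_⟩
  · rw [pvSet2, List.length_set]; exact hlen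
  · intro r hr
    rcases List.mem_or_eq_of_mem_set hr with hr' | hr'
    · exact hrow r hr'
    · subst hr'
      rw [List.length_set]
      have hT : T < dp.length := by omega
      rw [List.getD_eq_getElem dp [] hT]
      exact hrow _ (List.getElem_mem hT)
  · intro i j hi hj
    rw [get2_set2 dp a.length hlen hrow T (T + l) (by omega) (by omega) v i j]
    by_cases hij : i = T ∧ j = T + l
    · rw [if_pos hij]
      unfold pvVal2
      rw [if_pos (by omega), hv, hij.1, hij.2]
    · rw [if_neg hij, hget i j hi hj]
      unfold pvVal2
      split_ifs <;> first | rfl | (exfalso; omega)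

theorem fill_partial (a : List Char) (l : Nat) :
    ∀ (T : Nat), T + l ≤ a.length → ∀ dp, TableOK2 a l 0 dp →
    TableOK2 a l T ((List.range T).foldl
      (fun d t =>
        if l + 1 = 1 then pvSet2 d t (t + (l + 1) - 1) 1
        else pvSet2 d t (t + (l + 1) - 1) (pvCellA a d t (t + (l + 1) - 1)))
      dp) := by
  intro T
  induction T with
  | zero => intro _ dp h; exact h
  | succ T ihT =>
    intro hT dp h
    rw [List.range_succ, List.foldl_append, List.foldl_cons, List.foldl_nil]
    have hmid := ihT (by omega) dp h
    have hidx : T + (l + 1) - 1 = T + l := by omega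
    rw [hidx]
    by_cases hl0 : l + 1 = 1
    · rw [if_pos hl0]
      have hl0' : l = 0 := by omega
      apply set_preserve a l T _ (by omega) hmid
      rw [hl0']
      exact (pvS_diag a T).symm
    · rw [if_neg hl0]
      apply set_preserve a l T _ (by omega) hmid
      exact cell_eq a l T _ (by omega) (by omega) hmid

theorem fill_round (a : List Char) (l : Nat) (dp : List (List Int))
    (hlN : l < a.length) (h : TableOK2 a l 0 dp) :
    TableOK2 a (l + 1) 0 (pvFillLen a a.length (l + 1) dp) := by
  unfold pvFillLen
  have hrg : a.length + 1 - (l + 1) = a.length - l := by omega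
  rw [hrg]
  have hfin := fill_partial a l (a.length - l) (by omega) dp h
  obtain ⟨hlen, hrow, hget⟩ := hfin
  refine ⟨hlen, hrow, ?_⟩
  intro i j hi hj
  rw [hget i j hi hj]
  unfold pvVal2
  split_ifs <;> first | rfl | (exfalso; omega)

theorem fill_all (a : List Char) :
    ∀ (l : Nat), l ≤ a.length →
    TableOK2 a l 0 ((List.range l).foldl (fun d r => pvFillLen a a.length (r + 1) d)
      (List.replicate (a.length + 1) (List.replicate (a.length + 1) 0))) := by
  intro l
  induction l with
  | zero =>
    intro _
    simp only [List.range_zero, List.foldl_nil]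
    refine ⟨by simp, by intro r hr; rw [List.eq_of_mem_replicate hr]; simp, ?_⟩
    intro i j hi hj
    unfold pvGet2 pvVal2
    rw [List.getD_replicate _ (by omega), List.getD_replicate _ (by omega),
      if_neg (by omega)]
  | succ l ihl =>
    intro hl
    rw [List.range_succ, List.foldl_append, List.foldl_cons, List.foldl_nil]
    exact fill_round a l _ (by omega) (ihl (by omega))

theorem collapse_foldl_some (s : List Char) :
    ∀ (L : List Int), (∀ i ∈ L, PySem.List.pyGet? s i ≠ none) →
    ∀ (p : List Char × List Char), ∃ q,
      L.foldl
        (fun st i =>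
          match st with
          | none => none
          | some (ss, re) =>
            match PySem.List.pyGet? s i with
            | none => none
            | some c => if re ≠ [c] then some (ss ++ re, [c]) else some (ss, re))
        (some p) = some q := by
  intro L
  induction L with
  | nil => intro _ p; exact ⟨p, rfl⟩
  | cons x L ih =>
    intro hmem p
    cases hx : PySem.List.pyGet? s x with
    | none => exact absurd hx (hmem x (by simp))
    | some c =>
      simp only [List.foldl_cons, hx]
      by_cases hne : p.2 ≠ [c]
      · simp only [if_pos hne]
        exact ih (fun i hi => hmem i (by simp [hi])) _
      · simp only [if_neg hne]
        exact ih (fun i hi => hmem i (by simp [hi])) _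

theorem collapse_some (s : List Char) (n : Int) (h : n ≤ (s.length : Int)) :
    ∃ a, pvCollapse s n = some a := by
  unfold pvCollapse
  obtain ⟨q, hq⟩ := collapse_foldl_some s (PySem.List.pyRange 0 n 1)
    (by
      intro i hi
      have hmem := PySem.List.mem_pyRange_one.mp hi
      rw [Ne, PySem.List.pyGet?_eq_none_iff, not_not]
      constructor <;> omega)
    ([], [])
  exact ⟨q.1 ++ q.2, by rw [hq]; rfl⟩

-- ===== VERDICT (by name: the statement is the Claim_ definition above) =====
theorem main_core (s : List Char) (nn : Int) (hn : nn ≤ (s.length : Int)) :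
    (match pvCollapse s nn with
     | none => (0 : Int)
     | some a =>
       let N := a.length
       let dp0 : List (List Int) := List.replicate (N + 1) (List.replicate (N + 1) 0)
       let dp := (List.range N).foldl (fun d r => pvFillLen a N (r + 1) d) dp0
       (PySem.List.pyGet? (dp.getD 0 []) ((N : Int) - 1)).getD 0) =
    (match pvCollapse s nn with
     | none => 0
     | some a =>
       let N := a.length
       if N = 0 then 0 else (pvSolveB a 0 (N - 1) PySem.Dict.empty).1) := by
  obtain ⟨a, ha⟩ := collapse_some s nn hn
  rw [ha]
  simp only []
  by_cases hN : a.length = 0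
  · rw [List.length_eq_zero_iff] at hN
    subst hN
    decide
  · have hT := fill_all a a.length (le_refl _)
    obtain ⟨hlen, hrow, hget⟩ := hT
    have hcast : ((a.length : Int) - 1) = ((a.length - 1 : Nat) : Int) := by omega
    rw [hcast, PySem.List.pyGet?_natCast, ← List.getD_eq_getElem?_getD]
    have hL : (((List.range a.length).foldl (fun d r => pvFillLen a a.length (r + 1) d)
          (List.replicate (a.length + 1) (List.replicate (a.length + 1) 0))).getD 0 []).getD
          (a.length - 1) 0 = pvGet2 _ 0 (a.length - 1) := rfl
    rw [hL, hget 0 (a.length - 1) (by omega) (by omega)]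
    unfold pvVal2
    rw [if_pos ⟨by omega, by omega, Or.inl (by omega)⟩, if_neg hN]
    exact (solveB_spec a a.length 0 (a.length - 1) PySem.Dict.empty (by omega)
      (by intro i j v h; simp at h)).1.symm

-- ===== VERDICT (by name: the statement is the Claim_ definition above) =====
theorem min_operations_to_delete_string_spec : Claim_equal_min_operations_to_delete_string := by
  intro s n hdom hpre
  have hpre' : (n.getD (s.toList.length : Int)) ≤ (s.toList.length : Int) := hpre
  unfold Spec_min_operations_to_delete_string
  unfold min_operations_to_delete_string min_operations_to_delete_string_alt
  rcases n with _ | k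
  · exact main_core s.toList _ (by simp)
  · exact main_core s.toList k (by simpa using hpre')
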